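-- pv_equiv track=rewrite | github.com/abhinavk-codes/Arctic-s-Python-project | Arctic's Python Project/Password Strength Checker.py | has_digits_and_special_chars
-- ===== SOURCE A (Python) =====
-- def has_digits_and_special_chars(s):
--     has_digit = False
--     has_special = False
--
--     for i in range(len(s)):
--         ch = s[i]
--         if ch.isdigit():
--             has_digit = True
--         elif not ch.isalnum():
--             has_special = True
--         if has_digit and has_special:
--             return True
--     return False
-- ===== SOURCE B (Python) =====
-- def has_digits_and_special_chars(s):
--     # Two independent existence checks instead of one fused flag-carrying loop.
--     # A char is "special" iff not alphanumeric (digits are alnum, so A's elif agrees).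
--     return any(c.isdigit() for c in s) and any(not c.isalnum() for c in s)
-- ===== Notes on version B (the rewrite author's own statement) =====
-- stated objective: simpler
-- what changed: Replaced the fused two-flag loop with early exit by two independent short-circuited any() existence scans (digit exists, non-alphanumeric exists).
import Mathlib
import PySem

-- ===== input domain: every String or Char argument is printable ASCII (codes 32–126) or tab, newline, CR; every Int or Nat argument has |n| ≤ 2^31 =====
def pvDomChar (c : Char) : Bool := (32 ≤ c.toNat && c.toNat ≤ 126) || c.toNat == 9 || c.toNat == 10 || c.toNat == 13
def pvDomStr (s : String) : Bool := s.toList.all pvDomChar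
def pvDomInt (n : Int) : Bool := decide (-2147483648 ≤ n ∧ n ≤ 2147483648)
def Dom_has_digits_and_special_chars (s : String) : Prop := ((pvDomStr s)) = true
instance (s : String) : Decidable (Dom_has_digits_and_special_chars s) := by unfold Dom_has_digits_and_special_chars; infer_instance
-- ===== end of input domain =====

-- B replaces A's fused two-flag early-exit loop with two independent short-circuited existence scans; objective: simpler.


-- ===== PORT A =====
-- the for-loop over s with the two mutable flags and the early `return True`
def hdscLoopA : List Char → Bool → Bool → Bool
  | [], _, _ => false
  | ch :: rest, has_digit, has_special =>
    let has_digit' := if PySem.Chars.isdigit ch then true else has_digit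
    let has_special' :=
      if PySem.Chars.isdigit ch then has_special
      else if !PySem.Chars.isalnum ch then true else has_special
    if has_digit' && has_special' then true else hdscLoopA rest has_digit' has_special'

def has_digits_and_special_chars (s : String) : Bool :=
  hdscLoopA s.toList false false

-- ===== PORT B =====
def has_digits_and_special_chars_alt (s : String) : Bool :=
  s.toList.any (fun c => PySem.Chars.isdigit c) &&
  s.toList.any (fun c => !PySem.Chars.isalnum c)

-- ===== PRECONDITION & SPEC =====
def Spec_has_digits_and_special_chars (s : String) (out : Bool) : Prop := out = has_digits_and_special_chars_alt s
instance (s : String) (out : Bool) : Decidable (Spec_has_digits_and_special_chars s out) := by unfold Spec_has_digits_and_special_chars; infer_instance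

-- ===== CLAIM (what is proved, stated in full; the proofs are below) =====
def Claim_equal_has_digits_and_special_chars : Prop := ∀ (s : String), Dom_has_digits_and_special_chars s → Spec_has_digits_and_special_chars s (has_digits_and_special_chars s)

-- ===== LEMMAS AND PROOFS =====
-- a digit character is alphanumeric (isalnum = isalpha || isdigit)
lemma hdsc_digit_alnum (c : Char) (h : PySem.Chars.isdigit c = true) :
    PySem.Chars.isalnum c = true := by
  simp [PySem.Chars.isalnum, h]

-- loop invariant: A's loop computes "a digit was/will be seen AND a special char was/will be seen"
lemma hdscLoopA_eq (l : List Char) (d sp : Bool) (h : (d && sp) = false) :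
    hdscLoopA l d sp =
      ((d || l.any (fun c => PySem.Chars.isdigit c)) &&
       (sp || l.any (fun c => !PySem.Chars.isalnum c))) := by
  induction l generalizing d sp with
  | nil => cases d <;> cases sp <;> simp_all [hdscLoopA]
  | cons c rest ih =>
    by_cases hd : PySem.Chars.isdigit c = true
    · have ha := hdsc_digit_alnum c hd
      cases d <;> cases sp <;> simp_all [hdscLoopA, ih]
    · by_cases hs : PySem.Chars.isalnum c = true
      · cases d <;> cases sp <;> simp_all [hdscLoopA, ih]
      · cases d <;> cases sp <;> simp_all [hdscLoopA, ih]

-- ===== VERDICT (by name: the statement is the Claim_ definition above) =====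
theorem has_digits_and_special_chars_spec : Claim_equal_has_digits_and_special_chars := by
  intro s _
  unfold Spec_has_digits_and_special_chars has_digits_and_special_chars has_digits_and_special_chars_alt
  simp [hdscLoopA_eq _ false false rfl]
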